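-- pv_equiv track=rewrite | github.com/minskylab/signals | db/high.py | extract_expression
-- ===== SOURCE A (Python) =====
-- def extract_expression(statement: str, name: str) -> str:
--     expression: str = ""
--     for j in range(statement.index(name)+1, len(statement)):
--         c = statement[j]
--         if not c.isdigit():
--             if c not in "-T()":
--                 break
--         expression += c
--     return expression
-- ===== SOURCE B (Python) =====
-- def extract_expression(statement: str, name: str) -> str:
--     start = statement.index(name) + 1
--     n = len(statement)
--     end = next((j for j in range(start, n)
--                 if not (statement[j].isdigit() or statement[j] in "-T()")), n)
--     return statement[start:end]
-- ===== Notes on version B (the rewrite author's own statement) =====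
-- stated objective: idiomatic
-- what changed: B locates the end of the allowed run with next() over an index generator and returns one slice statement[start:end], instead of A's char-by-char string accumulation with break.
import Mathlib
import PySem

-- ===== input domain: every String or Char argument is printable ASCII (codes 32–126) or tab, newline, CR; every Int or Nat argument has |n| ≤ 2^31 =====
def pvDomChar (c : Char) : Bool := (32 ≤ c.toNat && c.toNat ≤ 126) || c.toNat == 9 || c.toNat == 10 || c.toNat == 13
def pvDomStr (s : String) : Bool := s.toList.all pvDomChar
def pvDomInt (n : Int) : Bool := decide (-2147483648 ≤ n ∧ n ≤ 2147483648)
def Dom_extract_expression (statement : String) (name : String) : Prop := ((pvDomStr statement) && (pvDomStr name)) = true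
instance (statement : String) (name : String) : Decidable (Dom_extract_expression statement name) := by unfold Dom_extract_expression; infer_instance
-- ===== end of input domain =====

-- ===== PORT A =====
-- B computes the same run by locating its end index and slicing once, instead of A's
-- char-by-char accumulation with break (objective: idiomatic; same O(n) cost).
-- A's loop: append while digit or in "-T()", break otherwise.
def extract_expression_loop : List Char → List Char → List Char
  | [], acc => acc
  | c :: rest, acc =>
    if ¬ c.isDigit then
      if ¬ (c ∈ "-T()".toList) then acc
      else extract_expression_loop rest (acc ++ [c])
    else extract_expression_loop rest (acc ++ [c])

def extract_expression (statement : String) (name : String) : String :=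
  let start := (PySem.Str.find statement name + 1).toNat
  String.ofList (extract_expression_loop (statement.toList.drop start) [])

-- ===== PORT B =====
def extract_expression_alt (statement : String) (name : String) : String :=
  let start := (PySem.Str.find statement name + 1).toNat
  let rest := statement.toList.drop start
  let e := rest.findIdx (fun c => !(c.isDigit || c ∈ "-T()".toList))
  String.ofList (rest.take e)

-- ===== PRECONDITION & SPEC =====
-- Pre_ excludes exactly the inputs where `statement.index(name)` raises ValueError
-- (name not a substring of statement): both A and B raise there.
def Pre_extract_expression (statement : String) (name : String) : Prop :=
  PySem.Str.isIn name statement = true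
instance (statement : String) (name : String) : Decidable (Pre_extract_expression statement name) := by unfold Pre_extract_expression; infer_instance
def pvWitness_extract_expression : String × String := ("x12-T(3)y", "x")
def Spec_extract_expression (statement : String) (name : String) (out : String) : Prop := out = extract_expression_alt statement name
instance (statement : String) (name : String) (out : String) : Decidable (Spec_extract_expression statement name out) := by unfold Spec_extract_expression; infer_instance

-- ===== CLAIM (what is proved, stated in full; the proofs are below) =====
def Claim_equal_extract_expression : Prop := ∀ (statement : String) (name : String), Dom_extract_expression statement name → Pre_extract_expression statement name → Spec_extract_expression statement name (extract_expression statement name)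

-- ===== LEMMAS AND PROOFS =====
theorem extract_expression_loop_eq (l acc : List Char) :
    extract_expression_loop l acc
      = acc ++ l.take (l.findIdx (fun c => !(c.isDigit || c ∈ "-T()".toList))) := by
  induction l generalizing acc with
  | nil => simp [extract_expression_loop]
  | cons c rest ih =>
    by_cases hd : c.isDigit
    · simp [extract_expression_loop, hd, List.findIdx_cons, ih]
    · by_cases hm : c ∈ "-T()".toList
      · have h4 : c = '-' ∨ c = 'T' ∨ c = '(' ∨ c = ')' := by simpa using hm
        rcases h4 with h | h | h | h <;> subst h <;>
          simp [extract_expression_loop, List.findIdx_cons, ih]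
      · have h4 : ¬(c = '-') ∧ ¬(c = 'T') ∧ ¬(c = '(') ∧ ¬(c = ')') := by
          simpa [not_or] using hm
        obtain ⟨h1, h2, h3, h5⟩ := h4
        simp [extract_expression_loop, hd, h1, h2, h3, h5, List.findIdx_cons]

-- ===== VERDICT (by name: the statement is the Claim_ definition above) =====
theorem extract_expression_spec : Claim_equal_extract_expression := by
  intro statement name _ _
  unfold Spec_extract_expression extract_expression extract_expression_alt
  simp [extract_expression_loop_eq]
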